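-- pv_equiv track=rewrite | github.com/steelhead-dev/pyqualw2 | pyqualw2/data.py | _get_next_block_idx
-- ===== SOURCE A (Python) =====
-- def _get_next_block_idx(lines: list[str], start: int, search: str) -> tuple[int, int]:
--     """Get the next data block's indices from the lines of a temperature profile file.
--
--     Temperature profile files have blocks of data that look like this:
--
--     TemperC       T1      T1      T1      T1      T1      T1      T1      T1      T1
--                20.75   20.35   20.04   19.93   19.74   18.58   15.19   14.32    13.7
--                13.16   12.96    12.8   12.65   12.52   12.39   12.27   12.15   12.02
--                 11.9   11.78   11.66   11.56   11.49   11.42   11.35   11.28   11.19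
--                ...
--
--     TDS mgl       C1      C1      C1      C1      C1      C1      C1      C1      C1
--                 32.0    32.0    32.0    32.0    32.0   31.79    30.8    29.5   28.19
--                27.11    27.0    27.0   27.02   27.29   27.64   27.99   28.32   28.65
--                28.98   29.34    29.7   30.12    30.7   31.29   31.86    32.0    32.0
--                ...
--
--     DO mgl        C2      C2      C2      C2      C2      C2      C2      C2      C2
--                 9.83    9.87    9.94    9.98    9.97    9.97   10.11   10.12   10.13
--                  9.9    9.88    9.87    9.85    9.84    9.83    9.82    9.81    9.79
--                 9.78    9.75    9.72    9.69    9.65    9.58     9.5    9.44     9.4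
--
--     This function grabs the line indices containing the next block of data.
--
--
--     Parameters
--     ----------
--     lines : list[str]
--         Lines read from a temperature profile file
--     start : int
--         Starting index to search
--     search : str
--         Text that the next block of data should start with
--
--     Returns
--     -------
--     tuple[int, int]
--         Starting and ending indices of the next block
--     """
--     for i in range(start, len(lines)):
--         if lines[i].startswith(search):
--             for j in range(i, len(lines)):
--                 if lines[j].strip() == "":
--                     return i, j
--
--             # End of file may not have a blank line
--             return i, len(lines) + 1
--
--     raise ValueError("Never found the search term.")
-- ===== SOURCE B (Python) =====
-- def _get_next_block_idx(lines: list[str], start: int, search: str) -> tuple[int, int]: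
--     """Single forward pass with a state flag instead of a nested find-then-rescan."""
--     found = None
--     for k in range(start, len(lines)):
--         if found is None and lines[k].startswith(search):
--             found = k
--         if found is not None and lines[k].strip() == "":
--             return found, k
--     if found is not None:
--         # End of file may not have a blank line
--         return found, len(lines) + 1
--     raise ValueError("Never found the search term.")
-- ===== Notes on version B (the rewrite author's own statement) =====
-- stated objective: alternative
-- what changed: Replaces A's nested find-then-rescan (outer search for the block start, inner rescan from there for the blank line) with a single forward pass carrying an Option state: the flag is set when the start line matches and the same pass detects the terminating blank line.
import Mathlib
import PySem

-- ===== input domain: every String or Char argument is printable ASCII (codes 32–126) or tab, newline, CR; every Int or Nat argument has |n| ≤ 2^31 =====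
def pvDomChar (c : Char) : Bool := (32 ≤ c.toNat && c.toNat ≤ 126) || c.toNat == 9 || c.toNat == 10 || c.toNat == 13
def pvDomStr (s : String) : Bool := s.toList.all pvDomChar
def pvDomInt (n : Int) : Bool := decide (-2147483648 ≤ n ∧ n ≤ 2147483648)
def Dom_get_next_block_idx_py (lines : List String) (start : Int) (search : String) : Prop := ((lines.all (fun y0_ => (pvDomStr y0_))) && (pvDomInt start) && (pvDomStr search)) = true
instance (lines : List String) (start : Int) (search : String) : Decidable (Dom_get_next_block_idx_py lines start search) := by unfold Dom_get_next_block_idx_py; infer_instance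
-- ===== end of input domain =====

-- B is an alternative decomposition: one forward pass with an Option state flag instead of
-- A's nested find-then-rescan.  Equivalence is about the RETURN value (neither mutates anything).

-- ===== PORT A =====
-- lines[i] with possibly negative index; under Pre_ every index hit is in range, so the default is never used
def pvLine (lines : List String) (i : Int) : String := (PySem.List.pyGet? lines i).getD ""

-- inner loop: for j in range(i, len(lines)): if lines[j].strip() == "": return i, j ; fallthrough (i, len+1)
def pvAInner (lines : List String) (i : Int) : List Int → Int × Int
  | [] => (i, (lines.length : Int) + 1)
  | j :: rest =>
    if PySem.Str.strip (pvLine lines j) = "" then (i, j) else pvAInner lines i rest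

-- outer loop: for i in range(start, len(lines)): if lines[i].startswith(search): <inner loop>
def pvAOuter (lines : List String) (search : String) : List Int → Option (Int × Int)
  | [] => none
  | i :: rest =>
    if PySem.Str.startswith (pvLine lines i) search then
      some (pvAInner lines i (PySem.List.pyRange i (lines.length : Int) 1))
    else pvAOuter lines search rest

def get_next_block_idx_py (lines : List String) (start : Int) (search : String) : Int × Int :=
  -- none = the ValueError at the bottom of A; excluded by Pre_
  (pvAOuter lines search (PySem.List.pyRange start (lines.length : Int) 1)).getD (0, 0)

-- ===== PORT B =====
-- single pass, state 'found : Option Int'; after the loop: return (found, len+1) or raise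
def pvBLoop (lines : List String) (search : String) : Option Int → List Int → Option (Int × Int)
  | st, [] => st.map (fun i => (i, (lines.length : Int) + 1))
  | st, k :: rest =>
    let st' : Option Int :=
      match st with
      | none => if PySem.Str.startswith (pvLine lines k) search then some k else none
      | some i => some i
    match st' with
    | some i =>
      if PySem.Str.strip (pvLine lines k) = "" then some (i, k)
      else pvBLoop lines search (some i) rest
    | none => pvBLoop lines search none rest

def get_next_block_idx_py_alt (lines : List String) (start : Int) (search : String) : Int × Int :=
  (pvBLoop lines search none (PySem.List.pyRange start (lines.length : Int) 1)).getD (0, 0)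

-- ===== PRECONDITION & SPEC =====
-- Pre_ = exactly where A returns: start not below -len (else IndexError on the first probe)
-- and some line in range(start, len) starts with search (else ValueError).
def Pre_get_next_block_idx_py (lines : List String) (start : Int) (search : String) : Prop :=
  -(lines.length : Int) ≤ start ∧
  ∃ i ∈ PySem.List.pyRange start (lines.length : Int) 1,
    PySem.Str.startswith ((PySem.List.pyGet? lines i).getD "") search = true
instance (lines : List String) (start : Int) (search : String) : Decidable (Pre_get_next_block_idx_py lines start search) := by unfold Pre_get_next_block_idx_py; infer_instance

def pvWitness_get_next_block_idx_py : List String × Int × String := (["TemperC  T1", " 20.75", "", "TDS mgl"], 0, "TemperC")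

def Spec_get_next_block_idx_py (lines : List String) (start : Int) (search : String) (out : Int × Int) : Prop := out = get_next_block_idx_py_alt lines start search
instance (lines : List String) (start : Int) (search : String) (out : Int × Int) : Decidable (Spec_get_next_block_idx_py lines start search out) := by unfold Spec_get_next_block_idx_py; infer_instance

-- ===== CLAIM (what is proved, stated in full; the proofs are below) =====
def Claim_equal_get_next_block_idx_py : Prop := ∀ (lines : List String) (start : Int) (search : String), Dom_get_next_block_idx_py lines start search → Pre_get_next_block_idx_py lines start search → Spec_get_next_block_idx_py lines start search (get_next_block_idx_py lines start search)

-- ===== LEMMAS AND PROOFS =====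

-- once the flag is set to i, B's remaining pass computes exactly A's inner rescan from there
theorem pvBLoop_some (lines : List String) (search : String) (i : Int) :
    ∀ js : List Int, pvBLoop lines search (some i) js = some (pvAInner lines i js) := by
  intro js
  induction js with
  | nil => simp [pvBLoop, pvAInner]
  | cons j rest ih =>
    simp only [pvBLoop, pvAInner]
    split_ifs <;> simp [ih]

-- the two passes over range(start, len) agree, for every start
theorem pvLoops_eq_aux (lines : List String) (search : String) :
    ∀ (n : Nat) (start : Int), ((lines.length : Int) - start).toNat ≤ n →
      pvBLoop lines search none (PySem.List.pyRange start (lines.length : Int) 1) =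
      pvAOuter lines search (PySem.List.pyRange start (lines.length : Int) 1) := by
  intro n
  induction n with
  | zero =>
    intro start h
    rw [PySem.List.pyRange_one_eq_nil (by omega)]
    simp [pvBLoop, pvAOuter]
  | succ n ih =>
    intro start h
    by_cases hlt : start < (lines.length : Int)
    · rw [PySem.List.pyRange_one_cons hlt]
      simp only [pvBLoop, pvAOuter]
      by_cases hs : PySem.Str.startswith (pvLine lines start) search = true
      · simp only [hs, if_true]
        rw [PySem.List.pyRange_one_cons hlt]
        simp only [pvAInner]
        by_cases hb : PySem.Str.strip (pvLine lines start) = ""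
        · simp [hb]
        · simp only [hb, if_false]
          rw [pvBLoop_some]
      · simp only [hs, Bool.false_eq_true, if_false]
        exact ih (start + 1) (by omega)
    · rw [PySem.List.pyRange_one_eq_nil (by omega)]
      simp [pvBLoop, pvAOuter]

theorem pvLoops_eq (lines : List String) (search : String) (start : Int) :
      pvBLoop lines search none (PySem.List.pyRange start (lines.length : Int) 1) =
      pvAOuter lines search (PySem.List.pyRange start (lines.length : Int) 1) :=
  pvLoops_eq_aux lines search (((lines.length : Int) - start).toNat) start (le_refl _)

-- ===== VERDICT (by name: the statement is the Claim_ definition above) =====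
theorem get_next_block_idx_py_spec : Claim_equal_get_next_block_idx_py := by
  intro lines start search _ _
  unfold Spec_get_next_block_idx_py get_next_block_idx_py get_next_block_idx_py_alt
  rw [pvLoops_eq]
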